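-- pv_equiv track=rewrite | github.com/csun-jtabu/Video-Mark-Automation-Script | Project3Script.py | assembleCSV
-- ===== SOURCE A (Python) =====
-- def stringToList(string):
--     lineList = string.splitlines()
--     return lineList
--
-- def getXytechInfo(string, infoWanted):
--     stringList = stringToList(string)  # We convert the xytech string to a list
--     infoWanted = infoWanted + ': '  # This will be the string we will be looking for in the line
--     length = len(infoWanted)  # We will get the length of the string of info we are looking for
--     info = ''  # This will store the info we are looking for
--     for line in stringList:  # for each line in the stringList
--         if line.find(infoWanted) != -1:  # we'll check if the infoWanted is in that line.
--             info = line[length:]  # if so, we'll store any information after that in the line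
--     return info
--
-- def getNotes(string):
--     stringList = stringToList(string) # We convert the xytech string to a list
--     infoWanted = 'Notes:'  # We will look for this note
--     notes = ''  # This will be where we store the notes
--     flag = False  # This flag will be used to see if we passed the 'Notes:' keyword
--     for line in stringList:  # for each line in the text/list we check if we passed Notes
--         if flag == True:  # if we did already, then we append any text after it
--             notes = notes + '\n' + line
--         if line.find(infoWanted) != -1:  # if we find the 'Notes:' keyword we set the flag to True
--             flag = True
--     notes = notes[1:]  # we don't care about 'Notes:' so we cut it off
--     return notes
--
-- def assembleCSV(bLightList, xytechString):
--     finalString = ''  # this is the new string we'll save the string in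
--
--     producer = getXytechInfo(xytechString, 'Producer')  # we get info for output from xytech string
--     operator = getXytechInfo(xytechString, 'Operator')
--     job = getXytechInfo(xytechString, 'Job')
--     notes = getNotes(xytechString)
--
--     line1 = 'Producer,Operator,Job,Notes\n'
--     line2 = producer + ',' + operator + ',' + job + ',' + notes + '\n\n\n' # in csv format we assmble info we got
--
--     line3 = 'Location,Frames to Fix,Timecode,Thumbnail\n'
--     for line in bLightList:  # basically we are combining all the lines together to create one long string
--         finalString = str(finalString) + str(line) + "\n"
--     finalString = line1 + line2 + line3 + finalString  # this is the final formatted string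
--
--     return finalString
-- ===== SOURCE B (Python) =====
-- def assembleCSV(bLightList, xytechString):
--     # single pass over the lines, fused extraction of all fields and notes
--     producer = operator = job = ''
--     notesAcc = ''
--     flag = False
--     for line in xytechString.splitlines():
--         if 'Producer: ' in line:
--             producer = line[10:]
--         if 'Operator: ' in line:
--             operator = line[10:]
--         if 'Job: ' in line:
--             job = line[5:]
--         if flag:
--             notesAcc += '\n' + line
--         if 'Notes:' in line:
--             flag = True
--     notes = notesAcc[1:]
--     return ('Producer,Operator,Job,Notes\n'
--             + producer + ',' + operator + ',' + job + ',' + notes + '\n\n\n'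
--             + 'Location,Frames to Fix,Timecode,Thumbnail\n'
--             + ''.join(line + '\n' for line in bLightList))
-- ===== Notes on version B (the rewrite author's own statement) =====
-- stated objective: faster
-- what changed: A scans the xytech string four times (three getXytechInfo passes plus getNotes) and builds the bLightList block by repeated 'finalString = finalString + line + "\n"' concatenation (quadratic); B makes a single fused pass over splitlines() maintaining all three fields, the notes accumulator and the past-Notes flag at once, and joins the bLightList lines with ''.join (linear).
import Mathlib
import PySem

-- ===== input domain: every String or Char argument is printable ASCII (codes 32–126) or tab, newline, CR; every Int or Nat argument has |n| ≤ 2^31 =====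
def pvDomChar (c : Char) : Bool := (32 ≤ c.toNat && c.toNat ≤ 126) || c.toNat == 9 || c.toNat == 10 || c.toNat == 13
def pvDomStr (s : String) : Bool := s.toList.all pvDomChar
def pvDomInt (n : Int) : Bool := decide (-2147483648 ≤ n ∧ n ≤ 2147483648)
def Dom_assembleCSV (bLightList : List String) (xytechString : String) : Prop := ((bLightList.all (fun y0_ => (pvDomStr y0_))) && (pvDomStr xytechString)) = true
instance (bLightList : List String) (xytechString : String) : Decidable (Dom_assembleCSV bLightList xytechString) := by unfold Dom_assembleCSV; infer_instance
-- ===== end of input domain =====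

-- B replaces A's four separate passes over the xytech string (three getXytechInfo calls and getNotes)
-- by ONE fused pass maintaining all fields and the notes accumulator together, and joins the report lines instead of repeated concatenation (objective: faster).

-- ===== PORT A =====
def stringToList (string : String) : List String :=
  PySem.Str.splitlines string

def getXytechInfo (string : String) (infoWanted0 : String) : String :=
  let stringList := stringToList string
  let infoWanted := infoWanted0 ++ ": "
  let length := PySem.Str.len infoWanted
  stringList.foldl (fun info line =>
    if PySem.Str.find line infoWanted ≠ -1 then PySem.Str.slice line (some length) none
    else info) ""

def getNotes (string : String) : String :=
  let stringList := stringToList string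
  let infoWanted := "Notes:"
  let st := stringList.foldl (fun (st : String × Bool) line =>
    let notes := if st.2 = true then st.1 ++ "\n" ++ line else st.1
    let flag := if PySem.Str.find line infoWanted ≠ -1 then true else st.2
    (notes, flag)) ("", false)
  PySem.Str.slice st.1 (some 1) none

def assembleCSV (bLightList : List String) (xytechString : String) : String :=
  let finalString0 : String := ""
  let producer := getXytechInfo xytechString "Producer"
  let operator := getXytechInfo xytechString "Operator"
  let job := getXytechInfo xytechString "Job"
  let notes := getNotes xytechString
  let line1 := "Producer,Operator,Job,Notes\n"
  let line2 := producer ++ "," ++ operator ++ "," ++ job ++ "," ++ notes ++ "\n\n\n"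
  let line3 := "Location,Frames to Fix,Timecode,Thumbnail\n"
  let finalString := bLightList.foldl (fun acc line => acc ++ line ++ "\n") finalString0
  line1 ++ line2 ++ line3 ++ finalString

-- ===== PORT B =====
-- one fused step per line: producer, operator, job, notes accumulator, past-Notes flag
def bStep (st : String × String × String × String × Bool) (line : String) :
    String × String × String × String × Bool :=
  let p := if PySem.Str.isIn "Producer: " line = true then PySem.Str.slice line (some 10) none else st.1
  let o := if PySem.Str.isIn "Operator: " line = true then PySem.Str.slice line (some 10) none else st.2.1
  let j := if PySem.Str.isIn "Job: " line = true then PySem.Str.slice line (some 5) none else st.2.2.1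
  let n := if st.2.2.2.2 = true then st.2.2.2.1 ++ ("\n" ++ line) else st.2.2.2.1
  let f := if PySem.Str.isIn "Notes:" line = true then true else st.2.2.2.2
  (p, o, j, n, f)

def assembleCSV_alt (bLightList : List String) (xytechString : String) : String :=
  let st := (PySem.Str.splitlines xytechString).foldl bStep ("", "", "", "", false)
  let notes := PySem.Str.slice st.2.2.2.1 (some 1) none
  "Producer,Operator,Job,Notes\n"
    ++ st.1 ++ "," ++ st.2.1 ++ "," ++ st.2.2.1 ++ "," ++ notes ++ "\n\n\n"
    ++ "Location,Frames to Fix,Timecode,Thumbnail\n"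
    ++ String.join (bLightList.map (fun line => line ++ "\n"))

-- ===== PRECONDITION & SPEC =====
def Spec_assembleCSV (bLightList : List String) (xytechString : String) (out : String) : Prop := out = assembleCSV_alt bLightList xytechString
instance (bLightList : List String) (xytechString : String) (out : String) : Decidable (Spec_assembleCSV bLightList xytechString out) := by unfold Spec_assembleCSV; infer_instance

-- ===== CLAIM (what is proved, stated in full; the proofs are below) =====
def Claim_equal_assembleCSV : Prop := ∀ (bLightList : List String) (xytechString : String), Dom_assembleCSV bLightList xytechString → Spec_assembleCSV bLightList xytechString (assembleCSV bLightList xytechString)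

-- ===== LEMMAS AND PROOFS =====

-- A's per-line steps, as named functions (proof-side only)
def aStep (iw : String) (slen : Int) (info line : String) : String :=
  if PySem.Str.find line iw ≠ -1 then PySem.Str.slice line (some slen) none else info

def nStep (st : String × Bool) (line : String) : String × Bool :=
  (if st.2 = true then st.1 ++ "\n" ++ line else st.1,
   if PySem.Str.find line "Notes:" ≠ -1 then true else st.2)

lemma gx_P (x : String) :
    getXytechInfo x "Producer" = (PySem.Str.splitlines x).foldl (aStep "Producer: " 10) "" := rfl
lemma gx_O (x : String) :
    getXytechInfo x "Operator" = (PySem.Str.splitlines x).foldl (aStep "Operator: " 10) "" := rfl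
lemma gx_J (x : String) :
    getXytechInfo x "Job" = (PySem.Str.splitlines x).foldl (aStep "Job: " 5) "" := rfl
lemma gn (x : String) :
    getNotes x
      = PySem.Str.slice ((PySem.Str.splitlines x).foldl nStep ("", false)).1 (some 1) none := rfl

lemma cond_iff (s sub : String) :
    (PySem.Str.isIn sub s = true) ↔ (PySem.Str.find s sub ≠ -1) := by
  rw [PySem.Str.find_ne_neg_one_iff, PySem.Str.isIn_iff_infix]

-- the fused pass computes exactly A's four folds
lemma fused (lines : List String) : ∀ (p o j n : String) (f : Bool),
    lines.foldl bStep (p, o, j, n, f)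
      = (lines.foldl (aStep "Producer: " 10) p,
         lines.foldl (aStep "Operator: " 10) o,
         lines.foldl (aStep "Job: " 5) j,
         lines.foldl nStep (n, f)) := by
  induction lines with
  | nil => intro p o j n f; rfl
  | cons line rest ih =>
    intro p o j n f
    have h : bStep (p, o, j, n, f) line
        = (aStep "Producer: " 10 p line, aStep "Operator: " 10 o line,
           aStep "Job: " 5 j line, nStep (n, f) line) := by
      simp only [bStep, aStep, nStep, cond_iff, String.append_assoc]
    simp only [List.foldl_cons, h]
    exact ih _ _ _ _ _

-- A's accumulator loop over bLightList is B's join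
lemma foldl_app_shift (xs : List String) : ∀ (a : String),
    xs.foldl (· ++ ·) a = a ++ xs.foldl (· ++ ·) "" := by
  induction xs with
  | nil => intro a; simp
  | cons c rest ih =>
    intro a
    simp only [List.foldl_cons]
    rw [ih (a ++ c), ih ("" ++ c)]
    simp [String.append_assoc]

lemma join_cons (a : String) (as : List String) :
    String.join (a :: as) = a ++ String.join as := by
  simp only [String.join, List.foldl_cons]
  rw [foldl_app_shift]
  simp

lemma join_lem (bl : List String) : ∀ (acc : String),
    bl.foldl (fun acc line => acc ++ line ++ "\n") acc
      = acc ++ String.join (bl.map (fun line => line ++ "\n")) := by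
  induction bl with
  | nil => intro acc; simp [String.join]
  | cons l rest ih =>
    intro acc
    simp only [List.foldl_cons, List.map_cons, ih, join_cons]
    simp [String.append_assoc]

-- ===== VERDICT (by name: the statement is the Claim_ definition above) =====
theorem assembleCSV_spec : Claim_equal_assembleCSV := by
  intro bl x _
  show assembleCSV bl x = assembleCSV_alt bl x
  simp only [assembleCSV, assembleCSV_alt, gx_P, gx_O, gx_J, gn, fused, join_lem]
  simp [String.append_assoc]
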